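-- pv_equiv track=rewrite | github.com/pypi-data/pypi-mirror-374 | packages/minesweepervariants/minesweepervariants-1.1.2.tar.gz/minesweepervariants-1.1.2/minesweepervariants/impl/rule/Rrule/1L/1L1W.py | MineStatus_1W
-- ===== SOURCE A (Python) =====
-- def MineStatus_1W(clue: list) -> list:
--     """
--     返回值：一个int列表，其中存的每一个int表示：
--         一个二进制数，第i位（从低到高）表示从左上角开始顺时针旋转，第i个格子的雷情况（是雷->1，非雷->0）
--         将这个二进制数转化为十进制存储到元素当中，如42(10) == 00101010(2)，即这个线索格的右上、右下、左下有雷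
--     """
--     ans = []
--     a = [0 for _ in range(8)]  # 决策列表
--
--     def dfs(step: int):
--         if step >= 8:  # 最终处理
--             # 先写没有剪枝的
--             test = []
--             last = 0
--             for i in range(8):
--                 if a[i]:
--                     last += 1
--                 else:
--                     if last != 0: test.append(last)
--                     last = 0
--             if last != 0: test.append(last)
--             if a[-1] and a[0] and len(test) != 1:
--                 test[0] += test[-1]
--                 del test[-1]
--             if not test: test = [0]
--             test.sort()
--             if test != clue: return None
--             #
--             status = 0
--             for i in range(8):
--                 status += 2 ** i * a[i]
--             if status not in ans:
--                 ans.append(status)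
--             # if a[:] not in ans:
--             #     ans.append(a[:])
--             return None
--         a[step] = 0
--         dfs(step + 1)
--         a[step] = 1
--         dfs(step + 1)
--         return None
--
--     dfs(0)
--     return ans
-- ===== SOURCE B (Python) =====
-- def _ring_runs(a):
--     # sorted lengths of the circular runs of mines in the 8-cell ring
--     if 0 not in a:
--         return [8]
--     i = a.index(0)
--     b = a[i:] + a[:i]  # rotate so the ring starts at an empty cell: no wraparound run
--     runs = []
--     cur = 0
--     for x in b:
--         if x:
--             cur += 1
--         elif cur:
--             runs.append(cur)
--             cur = 0
--     if cur:
--         runs.append(cur)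
--     return sorted(runs) if runs else [0]
--
--
-- def MineStatus_1W(clue: list) -> list:
--     ans = []
--     for n in range(256):
--         a = [n // 2 ** (7 - i) % 2 for i in range(8)]
--         if _ring_runs(a) == clue:
--             ans.append(sum(a[i] * 2 ** i for i in range(8)))
--     return ans
-- ===== Notes on version B (the rewrite author's own statement) =====
-- stated objective: idiomatic
-- what changed: Replaces the recursive DFS over a shared mutable 8-cell list (with a wraparound run-merge special case and a membership-checked append) by a flat loop over range(256) that decodes each configuration arithmetically and measures circular mine runs by rotating the ring to start at an empty cell, appending matches directly.
import Mathlib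
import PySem

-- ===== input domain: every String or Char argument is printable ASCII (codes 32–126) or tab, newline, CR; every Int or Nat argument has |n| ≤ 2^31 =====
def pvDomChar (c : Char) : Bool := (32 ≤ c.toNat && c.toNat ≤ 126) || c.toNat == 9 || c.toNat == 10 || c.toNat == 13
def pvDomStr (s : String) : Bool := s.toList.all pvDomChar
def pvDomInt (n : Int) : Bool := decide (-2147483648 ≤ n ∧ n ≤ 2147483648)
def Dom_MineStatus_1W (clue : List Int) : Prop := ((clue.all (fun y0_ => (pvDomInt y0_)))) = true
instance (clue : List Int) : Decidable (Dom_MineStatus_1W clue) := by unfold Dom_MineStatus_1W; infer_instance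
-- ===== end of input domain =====

-- B replaces A's recursive DFS over the 8 cells by arithmetic enumeration of the 256 ring
-- configurations (n // 2**(7-i) % 2) and removes the wraparound-merge special case by rotating
-- the ring to start at an empty cell before measuring runs (objective: idiomatic).

-- ===== PORT A =====
-- run-length computation at a DFS leaf (A's code inside `if step >= 8`, up to `test.sort()`)
-- (all list indices here are always in range: `a` has length 8 and `test` is nonempty in the
-- merge branch, so pyGetD's default is never used)
def runsA (a : List Int) : List Int :=
  let s := (PySem.List.pyRange 0 8 1).foldl
    (fun (s : List Int × Int) i =>
      if PySem.List.pyGetD a i 0 ≠ 0 then (s.1, s.2 + 1)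
      else if s.2 ≠ 0 then (s.1 ++ [s.2], 0) else (s.1, 0))
    ([], 0)
  let test := if s.2 ≠ 0 then s.1 ++ [s.2] else s.1
  let test :=
    if PySem.List.pyGetD a (-1) 0 ≠ 0 ∧ PySem.List.pyGetD a 0 0 ≠ 0 ∧ test.length ≠ 1 then
      (test.set 0 (PySem.List.pyGetD test 0 0 + PySem.List.pyGetD test (-1) 0)).dropLast
    else test
  let test := if test = [] then [0] else test
  PySem.List.sorted test (fun x => x) false

-- `status = sum over i of 2**i * a[i]`
def statusA (a : List Int) : Int :=
  (PySem.List.pyRange 0 8 1).foldl (fun s i => s + 2 ^ i.toNat * PySem.List.pyGetD a i 0) 0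

-- the leaf body of A's dfs (`step >= 8` branch)
def processA (clue : List Int) (a ans : List Int) : List Int :=
  if runsA a = clue then (if statusA a ∈ ans then ans else ans ++ [statusA a]) else ans

-- A's dfs; the shared mutable list `a` is threaded through and returned alongside `ans`
def dfsA (clue : List Int) (step : Nat) (a ans : List Int) : List Int × List Int :=
  if 8 ≤ step then (a, processA clue a ans)
  else
    let r := dfsA clue (step + 1) (a.set step 0) ans
    dfsA clue (step + 1) (r.1.set step 1) r.2
termination_by 8 - step
decreasing_by all_goals omega

def MineStatus_1W (clue : List Int) : List Int :=
  (dfsA clue 0 (List.replicate 8 0) []).2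

-- ===== PORT B =====
-- B's `_ring_runs`: rotate the ring to start at an empty cell, then linear runs (no wraparound)
def ringRuns (a : List Int) : List Int :=
  if (0 : Int) ∉ a then [8]
  else
    let i : Int := ((PySem.List.index? a 0).getD 0 : Nat)
    let b := PySem.List.slice a (some i) none ++ PySem.List.slice a none (some i)
    let s := b.foldl
      (fun (s : List Int × Int) x =>
        if x ≠ 0 then (s.1, s.2 + 1)
        else if s.2 ≠ 0 then (s.1 ++ [s.2], 0) else (s.1, 0))
      ([], 0)
    let runs := if s.2 ≠ 0 then s.1 ++ [s.2] else s.1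
    if runs ≠ [] then PySem.List.sorted runs (fun x => x) false else [0]

-- `[n // 2 ** (7 - i) % 2 for i in range(8)]`
def decodeB (n : Int) : List Int :=
  (PySem.List.pyRange 0 8 1).map
    (fun i => PySem.Int.mod (PySem.Int.floordiv n ((2 : Int) ^ (7 - i).toNat)) 2)

-- `sum(a[i] * 2 ** i for i in range(8))`
def statusB (a : List Int) : Int :=
  ((PySem.List.pyRange 0 8 1).map (fun i => PySem.List.pyGetD a i 0 * (2 : Int) ^ i.toNat)).sum

def MineStatus_1W_alt (clue : List Int) : List Int :=
  (PySem.List.pyRange 0 256 1).foldl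
    (fun ans n =>
      let a := decodeB n
      if ringRuns a = clue then ans ++ [statusB a] else ans) []

-- ===== PRECONDITION & SPEC =====
def Spec_MineStatus_1W (clue : List Int) (out : List Int) : Prop := out = MineStatus_1W_alt clue
instance (clue : List Int) (out : List Int) : Decidable (Spec_MineStatus_1W clue out) := by unfold Spec_MineStatus_1W; infer_instance

-- ===== CLAIM (what is proved, stated in full; the proofs are below) =====
def Claim_equal_MineStatus_1W : Prop := ∀ (clue : List Int), Dom_MineStatus_1W clue → Spec_MineStatus_1W clue (MineStatus_1W clue)

-- ===== LEMMAS AND PROOFS =====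

-- the list of 0/1 tails A's dfs enumerates below a fixed prefix, in DFS leaf order
def completions : Nat → List (List Int)
  | 0 => [[]]
  | n + 1 => (completions n).map (fun t => 0 :: t) ++ (completions n).map (fun t => 1 :: t)

lemma take_set_succ (a : List Int) (step : Nat) (v : Int) (h : step < a.length) :
    (a.set step v).take (step + 1) = a.take step ++ [v] := by
  rw [List.take_add_one]
  congr 1
  · apply List.ext_getElem
    · simp
    · intro i h1 h2
      simp at h1 h2 ⊢
      rw [List.getElem_set_ne (by omega)]
  · simp [h]

lemma set_append_cons (l r : List Int) (x v : Int) :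
    (l ++ x :: r).set l.length v = l ++ v :: r := by
  apply List.ext_getElem
  · simp
  · intro i h1 h2
    by_cases hi : i = l.length
    · subst hi; simp [List.getElem_append_right]
    · rw [List.getElem_set_ne (by omega)]
      by_cases hl : i < l.length
      · simp [hl]
      · simp only [List.getElem_append_right (by omega : l.length ≤ i)]
        rw [List.getElem_cons, List.getElem_cons]
        simp [show ¬ (i - l.length = 0) by omega]

lemma dfsA_eq (clue : List Int) : ∀ (n step : Nat) (a ans : List Int), step + n = 8 → a.length = 8 →
    dfsA clue step a ans = (a.take step ++ List.replicate n 1,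
      (completions n).foldl (fun ans t => processA clue (a.take step ++ t) ans) ans) := by
  intro n
  induction n with
  | zero =>
    intro step a ans h1 h2
    have hs : step = 8 := by omega
    subst hs
    rw [dfsA]
    simp [completions, List.take_of_length_le (le_of_eq h2)]
  | succ n ih =>
    intro step a ans h1 h2
    have hlt : step < 8 := by omega
    have hlen : (a.take step).length = step := by simp; omega
    rw [dfsA, if_neg (by omega)]
    have h2' : (a.set step 0).length = 8 := by simpa using h2
    have e1 := ih (step + 1) (a.set step 0) ans (by omega) h2'
    rw [take_set_succ a step 0 (by omega)] at e1
    rw [e1]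
    have e2 : ((a.take step ++ [0] ++ List.replicate n 1).set step 1)
        = a.take step ++ 1 :: List.replicate n 1 := by
      have h := set_append_cons (a.take step) (List.replicate n 1) 0 1
      rw [hlen] at h
      simpa [List.append_assoc] using h
    have e3 := ih (step + 1) (a.take step ++ 1 :: List.replicate n 1)
      ((completions n).foldl (fun ans t => processA clue (a.take step ++ [0] ++ t) ans) ans)
      (by omega) (by simp [hlen]; omega)
    have e4 : (a.take step ++ 1 :: List.replicate n 1).take (step + 1) = a.take step ++ [1] := by
      have h := List.take_length_add_append (l₁ := a.take step) (l₂ := 1 :: List.replicate n 1) 1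
      rw [hlen] at h
      simpa using h
    rw [e4] at e3
    simp only [e2, e3]
    rw [Prod.mk.injEq]
    constructor
    · simp [List.replicate_succ, List.append_assoc]
    · rw [show completions (n+1) = (completions n).map (fun t => 0 :: t) ++ (completions n).map (fun t => 1 :: t) from rfl]
      rw [List.foldl_append, List.foldl_map, List.foldl_map]
      simp [List.append_assoc]

lemma foldA_pairs (clue : List Int) : ∀ (ps : List (List Int × Int)) (ans : List Int),
    (ps.map Prod.snd).Nodup → (∀ p ∈ ps, p.2 ∉ ans) →
    ps.foldl (fun ans p => if p.1 = clue then (if p.2 ∈ ans then ans else ans ++ [p.2]) else ans) ans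
      = ans ++ (ps.filter (fun p => decide (p.1 = clue))).map Prod.snd := by
  intro ps
  induction ps with
  | nil => intro ans _ _; simp
  | cons p ps ih =>
    intro ans hnd hmem
    simp only [List.map_cons, List.nodup_cons] at hnd
    by_cases hp : p.1 = clue
    · have hpa : p.2 ∉ ans := hmem p (by simp)
      have hrest : ∀ q ∈ ps, q.2 ∉ ans ++ [p.2] := by
        intro q hq
        simp only [List.mem_append, List.mem_singleton]
        push Not
        exact ⟨hmem q (by simp [hq]), fun h => hnd.1 (h ▸ List.mem_map_of_mem hq)⟩
      simp only [List.foldl_cons, if_pos hp, if_neg hpa]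
      rw [ih (ans ++ [p.2]) hnd.2 hrest]
      simp [hp, List.append_assoc]
    · simp only [List.foldl_cons, if_neg hp]
      rw [ih ans hnd.2 (fun q hq => hmem q (by simp [hq]))]
      simp [hp]

lemma foldB_pairs (clue : List Int) : ∀ (ps : List (List Int × Int)) (ans : List Int),
    ps.foldl (fun ans p => if p.1 = clue then ans ++ [p.2] else ans) ans
      = ans ++ (ps.filter (fun p => decide (p.1 = clue))).map Prod.snd := by
  intro ps
  induction ps with
  | nil => intro ans; simp
  | cons p ps ih =>
    intro ans
    by_cases hp : p.1 = clue
    · simp [hp, ih, List.append_assoc]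
    · simp [hp, ih]

def pairsA : List (List Int × Int) := (completions 8).map (fun t => (runsA t, statusA t))
def pairsB : List (List Int × Int) :=
  (PySem.List.pyRange 0 256 1).map (fun n => (ringRuns (decodeB n), statusB (decodeB n)))

set_option maxRecDepth 100000 in
lemma pairs_eq : pairsA = pairsB := by decide

set_option maxRecDepth 100000 in
lemma pairsB_snd_nodup : (pairsB.map Prod.snd).Nodup := by decide

lemma A_as_pairs (clue : List Int) :
    MineStatus_1W clue = pairsA.foldl
      (fun ans p => if p.1 = clue then (if p.2 ∈ ans then ans else ans ++ [p.2]) else ans) [] := by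
  unfold MineStatus_1W
  rw [dfsA_eq clue 8 0 (List.replicate 8 0) [] rfl (by simp)]
  unfold pairsA
  rw [List.foldl_map]
  simp [processA]

lemma B_as_pairs (clue : List Int) :
    MineStatus_1W_alt clue = pairsB.foldl
      (fun ans p => if p.1 = clue then ans ++ [p.2] else ans) [] := by
  unfold MineStatus_1W_alt pairsB
  rw [List.foldl_map]

-- ===== VERDICT (by name: the statement is the Claim_ definition above) =====
theorem MineStatus_1W_spec : Claim_equal_MineStatus_1W := by
  intro clue _
  unfold Spec_MineStatus_1W
  rw [A_as_pairs, pairs_eq, foldA_pairs clue pairsB [] pairsB_snd_nodup (fun p _ => by simp),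
    B_as_pairs, foldB_pairs]
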